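-- pv_equiv track=rewrite | github.com/Agent-on-the-Fly/Memento-S | core/skill/execution/tool_bridge/context.py | _deduplicate_path_components
-- ===== SOURCE A (Python) =====
-- def _deduplicate_path_components(
--     root_parts: list[str], rel_parts: list[str]
-- ) -> list[str]:
--     """Deduplicate overlapping path components between root and relative path.
--
--     Compares path components from the end of root_parts with the beginning
--     of rel_parts to find and remove overlapping segments.
--     """
--     if not rel_parts:
--         return root_parts
--
--     # Find the maximum possible overlap (up to min length)
--     max_overlap = min(len(root_parts), len(rel_parts))
--
--     # Check for overlapping segments from largest to smallest
--     for overlap in range(max_overlap, 0, -1):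
--         # Compare last 'overlap' elements of root_parts with first 'overlap' of rel_parts
--         if root_parts[-overlap:] == rel_parts[:overlap]:
--             # Found overlap, merge by taking root_parts + remaining rel_parts
--             return root_parts + rel_parts[overlap:]
--
--     # No overlap found, simple concatenation
--     return root_parts + rel_parts
-- ===== SOURCE B (Python) =====
-- def _deduplicate_path_components(
--     root_parts: list[str], rel_parts: list[str]
-- ) -> list[str]:
--     """KMP-based exact re-implementation: compute the longest prefix of
--     rel_parts that is a suffix of root_parts in one linear pass."""
--     if not rel_parts:
--         return root_parts
--     m = len(rel_parts)
--     # prefix function (longest proper border) of rel_parts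
--     pi = [0]
--     k = 0
--     for i in range(1, m):
--         c = rel_parts[i]
--         while k > 0 and rel_parts[k] != c:
--             k = pi[k - 1]
--         if rel_parts[k] == c:
--             k += 1
--         pi.append(k)
--     # stream root_parts through the matching automaton
--     k = 0
--     for c in root_parts:
--         while k > 0 and (k == m or rel_parts[k] != c):
--             k = pi[k - 1]
--         if k < m and rel_parts[k] == c:
--             k += 1
--     return root_parts + rel_parts[k:]
-- ===== Notes on version B (the rewrite author's own statement) =====
-- stated objective: faster
-- what changed: Replaces the descending scan that re-slices and compares list prefixes/suffixes for every candidate overlap with a KMP prefix-function automaton: the longest prefix of rel_parts that is a suffix of root_parts is found in one linear pass.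
import Mathlib
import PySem

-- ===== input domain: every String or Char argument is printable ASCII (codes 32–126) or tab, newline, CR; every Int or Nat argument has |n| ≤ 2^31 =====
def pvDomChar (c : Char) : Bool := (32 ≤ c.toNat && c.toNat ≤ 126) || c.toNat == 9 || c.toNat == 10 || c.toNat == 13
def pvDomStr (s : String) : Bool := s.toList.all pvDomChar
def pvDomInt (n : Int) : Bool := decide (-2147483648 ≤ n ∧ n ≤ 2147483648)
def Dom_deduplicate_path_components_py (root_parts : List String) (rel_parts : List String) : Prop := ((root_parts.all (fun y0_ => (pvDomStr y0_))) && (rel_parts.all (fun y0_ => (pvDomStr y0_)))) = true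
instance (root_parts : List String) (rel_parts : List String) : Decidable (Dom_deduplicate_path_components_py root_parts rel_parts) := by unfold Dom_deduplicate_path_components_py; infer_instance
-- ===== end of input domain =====

-- B replaces A's quadratic descending scan (one slice-and-compare per candidate overlap) by a
-- KMP prefix-function automaton that finds the longest prefix of rel_parts that is a suffix of
-- root_parts in one linear pass (objective: faster).

-- ===== PORT A =====
-- `for overlap in range(max_overlap, 0, -1)` with early return, as structural recursion on the counter
def pyA_go (root_parts rel_parts : List String) : Nat → List String
  | 0 => root_parts ++ rel_parts
  | ov+1 =>
    if PySem.List.slice root_parts (some (-((ov+1 : Nat) : Int))) none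
       = PySem.List.slice rel_parts none (some ((ov+1 : Nat) : Int)) then
      root_parts ++ PySem.List.slice rel_parts (some ((ov+1 : Nat) : Int)) none
    else pyA_go root_parts rel_parts ov

def deduplicate_path_components_py (root_parts : List String) (rel_parts : List String) : List String :=
  if rel_parts = [] then root_parts
  else pyA_go root_parts rel_parts (min root_parts.length rel_parts.length)

-- ===== PORT B =====
-- `while k > 0 and rel_parts[k] != c` of the prefix-function build; fuel = entry value of k
-- (each iteration strictly decreases k, so k iterations suffice)
def kmpFall1 (rel : List String) (tbl : List Nat) (c : String) : Nat → Nat → Nat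
  | 0, k => k
  | fuel+1, k =>
    if k ≠ 0 ∧ rel.getD k "" ≠ c then kmpFall1 rel tbl c fuel (tbl.getD (k-1) 0) else k

-- `while k > 0 and (k == m or rel_parts[k] != c)` of the scan over root_parts; fuel likewise
def kmpFall2 (rel : List String) (tbl : List Nat) (m : Nat) (c : String) : Nat → Nat → Nat
  | 0, k => k
  | fuel+1, k =>
    if k ≠ 0 ∧ (k = m ∨ rel.getD k "" ≠ c) then kmpFall2 rel tbl m c fuel (tbl.getD (k-1) 0) else k

-- body of `for i in range(1, m)` building the prefix table (state: table so far, running k)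
def kmpBStep (rel : List String) (st : List Nat × Nat) (c : String) : List Nat × Nat :=
  let k := kmpFall1 rel st.1 c st.2 st.2
  let k := if rel.getD k "" = c then k + 1 else k
  (st.1 ++ [k], k)

def kmpBuild (rel : List String) : List Nat × Nat :=
  (rel.drop 1).foldl (kmpBStep rel) ([0], 0)

-- body of `for c in root_parts`
def kmpSStep (rel : List String) (tbl : List Nat) (m : Nat) (k : Nat) (c : String) : Nat :=
  let k := kmpFall2 rel tbl m c k k
  if k < m ∧ rel.getD k "" = c then k + 1 else k

def deduplicate_path_components_py_alt (root_parts : List String) (rel_parts : List String) : List String :=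
  if rel_parts = [] then root_parts
  else
    let m := rel_parts.length
    let tbl := (kmpBuild rel_parts).1
    let k := root_parts.foldl (kmpSStep rel_parts tbl m) 0
    root_parts ++ rel_parts.drop k

-- ===== PRECONDITION & SPEC =====
def Spec_deduplicate_path_components_py (root_parts : List String) (rel_parts : List String) (out : List String) : Prop := out = deduplicate_path_components_py_alt root_parts rel_parts
instance (root_parts : List String) (rel_parts : List String) (out : List String) : Decidable (Spec_deduplicate_path_components_py root_parts rel_parts out) := by unfold Spec_deduplicate_path_components_py; infer_instance

-- ===== CLAIM (what is proved, stated in full; the proofs are below) =====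
def Claim_equal_deduplicate_path_components_py : Prop := ∀ (root_parts : List String) (rel_parts : List String), Dom_deduplicate_path_components_py root_parts rel_parts → Spec_deduplicate_path_components_py root_parts rel_parts (deduplicate_path_components_py root_parts rel_parts)

-- ===== LEMMAS AND PROOFS =====

-- j is an admissible overlap of rel with text t
abbrev Bp (rel t : List String) (j : Nat) : Prop := j ≤ rel.length ∧ rel.take j <:+ t

-- longest admissible overlap of rel with t
def Sfun (rel t : List String) : Nat := Nat.findGreatest (Bp rel t) rel.length

-- length of the longest proper border of rel.take n (the value KMP's prefix function must hold)
def pf (rel : List String) (n : Nat) : Nat :=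
  Nat.findGreatest (fun j => rel.take j <:+ rel.take n) (n-1)

-- the predicate the fallback loop maximises
abbrev Rp (rel : List String) (m : Nat) (c : String) (k0 j : Nat) : Prop :=
  rel.take j <:+ rel.take k0 ∧ (j = 0 ∨ (j < m ∧ rel.getD j "" = c))

theorem suffix_of_suffix_le {u v t : List String} (hu : u <:+ t) (hv : v <:+ t)
    (h : u.length ≤ v.length) : u <:+ v := by
  rw [← List.reverse_prefix] at hu hv ⊢
  exact List.prefix_of_prefix_length_le hu hv (by simpa using h)

theorem take_getD {rel : List String} {j : Nat} (h : j < rel.length) :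
    rel.take (j+1) = rel.take j ++ [rel.getD j ""] := by
  rw [List.take_add_one]
  simp [List.getElem?_eq_getElem h, List.getD_eq_getElem?_getD]

theorem snoc_suffix_snoc {l t : List String} {a c : String} :
    (l ++ [a]) <:+ (t ++ [c]) ↔ (l <:+ t ∧ a = c) := by
  rw [← List.reverse_prefix]
  simp only [List.reverse_append, List.reverse_singleton, List.singleton_append,
    List.cons_prefix_cons, List.reverse_prefix]
  tauto

theorem cand_iff {rel t : List String} {c : String} {j : Nat} (h0 : 0 < j) (hm : j ≤ rel.length) :
    (rel.take j <:+ t ++ [c]) ↔ (rel.take (j-1) <:+ t ∧ rel.getD (j-1) "" = c) := by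
  obtain ⟨j, rfl⟩ := Nat.exists_eq_add_of_lt h0
  simp only [Nat.zero_add, Nat.add_sub_cancel]
  rw [take_getD (by omega), snoc_suffix_snoc]

theorem fg_congr {P Q : Nat → Prop} [DecidablePred P] [DecidablePred Q] {n : Nat}
    (h : ∀ j, j ≤ n → (P j ↔ Q j)) : Nat.findGreatest P n = Nat.findGreatest Q n := by
  induction n with
  | zero => rfl
  | succ n ih =>
    rw [Nat.findGreatest_succ, Nat.findGreatest_succ]
    by_cases hp : P (n+1)
    · rw [if_pos hp, if_pos ((h (n+1) le_rfl).mp hp)]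
    · rw [if_neg hp, if_neg (fun hq => hp ((h (n+1) le_rfl).mpr hq))]
      exact ih (fun j hj => h j (by omega))

theorem fg_shrink {P : Nat → Prop} [DecidablePred P] {n1 n2 : Nat} (hle : n2 ≤ n1)
    (h : ∀ j, n2 < j → j ≤ n1 → ¬ P j) : Nat.findGreatest P n1 = Nat.findGreatest P n2 := by
  induction n1 with
  | zero => have : n2 = 0 := by omega
            simp [this]
  | succ n1 ih =>
    rcases Nat.lt_or_ge n2 (n1+1) with hlt | hge
    · rw [Nat.findGreatest_succ, if_neg (h (n1+1) hlt le_rfl)]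
      exact ih (by omega) (fun j h1 h2 => h j h1 (by omega))
    · have : n2 = n1 + 1 := by omega
      simp [this]

theorem pf_lt {rel : List String} {n : Nat} (h : 0 < n) : pf rel n < n := by
  have := Nat.findGreatest_le (P := fun j => rel.take j <:+ rel.take n) (n-1)
  unfold pf
  omega

theorem pf_suffix (rel : List String) (n : Nat) : rel.take (pf rel n) <:+ rel.take n := by
  unfold pf
  exact Nat.findGreatest_spec (P := fun j => rel.take j <:+ rel.take n) (Nat.zero_le _)
    (by simpa using List.nil_suffix)

theorem pf_max {rel : List String} {n j : Nat} (hj : j < n) (h : rel.take j <:+ rel.take n) :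
    j ≤ pf rel n := by
  exact Nat.le_findGreatest (by omega) h

theorem chain_iff {rel t : List String} {k0 j : Nat} (hj : j ≤ k0) (hk : k0 ≤ rel.length)
    (hs : rel.take k0 <:+ t) : (rel.take j <:+ t ↔ rel.take j <:+ rel.take k0) := by
  constructor
  · intro hj'
    exact suffix_of_suffix_le hj' hs (by simp only [List.length_take]; omega)
  · intro hj'
    exact hj'.trans hs

theorem fall2_correct {rel : List String} {tbl : List Nat} {c : String} :
    ∀ fuel k0, k0 ≤ fuel → k0 ≤ rel.length →
      (∀ i, i < k0 → tbl.getD i 0 = pf rel (i+1)) →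
      kmpFall2 rel tbl rel.length c fuel k0 = Nat.findGreatest (Rp rel rel.length c k0) k0 := by
  intro fuel
  induction fuel with
  | zero =>
    intro k0 hf _ _
    have hk0 : k0 = 0 := by omega
    subst hk0
    simp [kmpFall2]
  | succ fuel ih =>
    intro k0 hf hk htbl
    rw [kmpFall2]
    by_cases hc : k0 ≠ 0 ∧ (k0 = rel.length ∨ rel.getD k0 "" ≠ c)
    · rw [if_pos hc]
      obtain ⟨hk0, hstop⟩ := hc
      have hlen : k0 - 1 < k0 := by omega
      have htv : tbl.getD (k0-1) 0 = pf rel k0 := by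
        have := htbl (k0-1) hlen
        rwa [Nat.sub_add_cancel (by omega)] at this
      have hpf : pf rel k0 < k0 := pf_lt (by omega)
      rw [htv]
      rw [ih (pf rel k0) (by omega) (by omega) (fun i hi => htbl i (by omega))]
      -- findGreatest over cap k0 = findGreatest over cap (pf rel k0)
      have hshrink : Nat.findGreatest (Rp rel rel.length c k0) k0
          = Nat.findGreatest (Rp rel rel.length c k0) (pf rel k0) := by
        apply fg_shrink (by omega)
        intro j h1 h2 hR
        obtain ⟨hsfx, hmatch⟩ := hR
        have hj0 : j ≠ 0 := by omega
        have hjm : j < rel.length ∧ rel.getD j "" = c := by tauto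
        rcases Nat.lt_or_ge j k0 with hjlt | hjge
        · have := pf_max hjlt hsfx
          omega
        · have : j = k0 := by omega
          subst this
          rcases hstop with h | h
          · omega
          · exact h hjm.2
      rw [hshrink]
      apply fg_congr
      intro j hj
      constructor
      · rintro ⟨hsfx, hm⟩
        exact ⟨hsfx.trans (pf_suffix rel k0), hm⟩
      · rintro ⟨hsfx, hm⟩
        exact ⟨(chain_iff hj (by omega) (pf_suffix rel k0)).mp hsfx, hm⟩
    · rw [if_neg hc]
      have hR : Rp rel rel.length c k0 k0 := by
        refine ⟨List.suffix_refl _, ?_⟩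
        by_cases h0 : k0 = 0
        · exact Or.inl h0
        · right
          push_neg at hc
          have := hc h0
          exact ⟨by omega, by tauto⟩
      have h1 := Nat.le_findGreatest le_rfl hR
      have h2 := Nat.findGreatest_le (P := Rp rel rel.length c k0) k0
      omega

theorem fall1_eq_fall2 {rel : List String} {tbl : List Nat} {c : String} :
    ∀ fuel k0, k0 ≤ fuel → k0 < rel.length →
      (∀ i, i < k0 → tbl.getD i 0 = pf rel (i+1)) →
      kmpFall1 rel tbl c fuel k0 = kmpFall2 rel tbl rel.length c fuel k0 := by
  intro fuel
  induction fuel with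
  | zero => intro k0 _ _ _; simp [kmpFall1, kmpFall2]
  | succ fuel ih =>
    intro k0 hf hk htbl
    rw [kmpFall1, kmpFall2]
    have hiff : (k0 ≠ 0 ∧ rel.getD k0 "" ≠ c) ↔ (k0 ≠ 0 ∧ (k0 = rel.length ∨ rel.getD k0 "" ≠ c)) := by
      constructor
      · rintro ⟨h1, h2⟩; exact ⟨h1, Or.inr h2⟩
      · rintro ⟨h1, h2⟩
        refine ⟨h1, ?_⟩
        rcases h2 with h | h
        · omega
        · exact h
    by_cases hc : k0 ≠ 0 ∧ rel.getD k0 "" ≠ c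
    · rw [if_pos hc, if_pos (hiff.mp hc)]
      have hk0 : k0 ≠ 0 := hc.1
      have htv : tbl.getD (k0-1) 0 = pf rel k0 := by
        have := htbl (k0-1) (by omega)
        rwa [Nat.sub_add_cancel (by omega)] at this
      have hpf : pf rel k0 < k0 := pf_lt (by omega)
      rw [htv]
      exact ih (pf rel k0) (by omega) (by omega) (fun i hi => htbl i (by omega))
    · rw [if_neg hc, if_neg (fun h => hc (hiff.mpr h))]

theorem sstep_correct {rel : List String} {tbl : List Nat} {c : String} {t : List String}
    (htbl : ∀ i, i < rel.length → tbl.getD i 0 = pf rel (i+1)) :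
    kmpSStep rel tbl rel.length (Sfun rel t) c = Sfun rel (t ++ [c]) := by
  have hk0m : Sfun rel t ≤ rel.length := Nat.findGreatest_le _
  have hBp : Bp rel t (Sfun rel t) :=
    Nat.findGreatest_spec (P := Bp rel t) (Nat.zero_le _)
      ⟨Nat.zero_le _, by simpa using List.nil_suffix⟩
  have hmax : ∀ j, Bp rel t j → j ≤ Sfun rel t := fun j hj => Nat.le_findGreatest hj.1 hj
  unfold kmpSStep
  rw [fall2_correct (Sfun rel t) (Sfun rel t) le_rfl hk0m (fun i hi => htbl i (by omega))]
  set k0 := Sfun rel t with hk0def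
  set F := Nat.findGreatest (Rp rel rel.length c k0) k0 with hFdef
  have hRF : Rp rel rel.length c k0 F :=
    Nat.findGreatest_spec (P := Rp rel rel.length c k0) (Nat.zero_le _)
      ⟨by simpa using List.nil_suffix, Or.inl rfl⟩
  have hFk0 : F ≤ k0 := Nat.findGreatest_le _
  have hFs : rel.take F <:+ t := hRF.1.trans hBp.2
  have hRmax : ∀ j, j ≤ k0 → Rp rel rel.length c k0 j → j ≤ F :=
    fun j h1 h2 => Nat.le_findGreatest h1 h2
  by_cases hC : F < rel.length ∧ rel.getD F "" = c
  · rw [if_pos hC]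
    apply le_antisymm
    · apply Nat.le_findGreatest (by omega)
      refine ⟨by omega, ?_⟩
      rw [cand_iff (by omega) (by omega)]
      simpa using ⟨hFs, hC.2⟩
    · have hBp' : Bp rel (t ++ [c]) (Sfun rel (t ++ [c])) :=
        Nat.findGreatest_spec (P := Bp rel (t ++ [c])) (Nat.zero_le _)
          ⟨Nat.zero_le _, by simpa using List.nil_suffix⟩
      set p := Sfun rel (t ++ [c]) with hpdef
      rcases Nat.eq_zero_or_pos p with hp0 | hp0
      · omega
      · obtain ⟨hpm, hpsfx⟩ := hBp'
        rw [cand_iff hp0 hpm] at hpsfx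
        have h1 : p - 1 ≤ k0 := hmax (p-1) ⟨by omega, hpsfx.1⟩
        have h2 : rel.take (p-1) <:+ rel.take k0 := (chain_iff h1 hk0m hBp.2).mp hpsfx.1
        have h3 : p - 1 ≤ F := hRmax (p-1) h1 ⟨h2, Or.inr ⟨by omega, hpsfx.2⟩⟩
        omega
  · rw [if_neg hC]
    have hF0 : F = 0 := by
      rcases hRF.2 with h | h
      · exact h
      · exact absurd h hC
    symm
    rw [hk0def] at *
    unfold Sfun
    rw [hF0, Nat.findGreatest_eq_zero_iff]
    intro j h0 hjm hBj
    obtain ⟨_, hsfx⟩ := hBj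
    rw [cand_iff h0 hjm] at hsfx
    have h1 : j - 1 ≤ Sfun rel t := hmax (j-1) ⟨by omega, hsfx.1⟩
    have h2 : rel.take (j-1) <:+ rel.take (Sfun rel t) := (chain_iff h1 hk0m hBp.2).mp hsfx.1
    have h3 : j - 1 ≤ F := hRmax (j-1) h1 ⟨h2, Or.inr ⟨by omega, hsfx.2⟩⟩
    have hj1 : j = 1 := by omega
    apply hC
    rw [hF0]
    constructor
    · omega
    · have hj10 : j - 1 = 0 := by omega
      have hc2 := hsfx.2
      rwa [hj10] at hc2

theorem Sfun_nil (rel : List String) : Sfun rel [] = 0 := by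
  unfold Sfun
  rw [Nat.findGreatest_eq_zero_iff]
  intro j h0 hj hB
  obtain ⟨hjm, hsfx⟩ := hB
  have := List.suffix_nil.mp hsfx
  rw [List.take_eq_nil_iff] at this
  rcases this with h | h
  · omega
  · rw [h] at hjm
    simp at hjm
    omega

theorem scan_inv {rel : List String} {tbl : List Nat}
    (htbl : ∀ i, i < rel.length → tbl.getD i 0 = pf rel (i+1)) :
    ∀ (xs t : List String),
      xs.foldl (kmpSStep rel tbl rel.length) (Sfun rel t) = Sfun rel (t ++ xs) := by
  intro xs
  induction xs with
  | nil => intro t; simp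
  | cons x xs ih =>
    intro t
    rw [List.foldl_cons, sstep_correct htbl, ih (t ++ [x])]
    simp

theorem bstep_correct {rel : List String} {tbl : List Nat} {n : Nat}
    (h0 : 0 < n) (hn : n < rel.length)
    (htbl : ∀ i, i < n → tbl.getD i 0 = pf rel (i+1)) :
    kmpBStep rel (tbl, pf rel n) (rel.getD n "") = (tbl ++ [pf rel (n+1)], pf rel (n+1)) := by
  have hpf : pf rel n < n := pf_lt h0
  have hsnoc : rel.take (n+1) = rel.take n ++ [rel.getD n ""] := take_getD hn
  unfold kmpBStep
  rw [fall1_eq_fall2 (pf rel n) (pf rel n) le_rfl (by omega) (fun i hi => htbl i (by omega)),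
    fall2_correct (pf rel n) (pf rel n) le_rfl (by omega) (fun i hi => htbl i (by omega))]
  set c := rel.getD n "" with hcdef
  set F := Nat.findGreatest (Rp rel rel.length c (pf rel n)) (pf rel n) with hFdef
  have hRF : Rp rel rel.length c (pf rel n) F :=
    Nat.findGreatest_spec (P := Rp rel rel.length c (pf rel n)) (Nat.zero_le _)
      ⟨by simpa using List.nil_suffix, Or.inl rfl⟩
  have hFk0 : F ≤ pf rel n := Nat.findGreatest_le _
  have hRmax : ∀ j, j ≤ pf rel n → Rp rel rel.length c (pf rel n) j → j ≤ F :=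
    fun j h1 h2 => Nat.le_findGreatest h1 h2
  have hFs : rel.take F <:+ rel.take n := hRF.1.trans (pf_suffix rel n)
  have key : (if rel.getD F "" = c then F + 1 else F) = pf rel (n+1) := by
    by_cases hC : rel.getD F "" = c
    · rw [if_pos hC]
      apply le_antisymm
      · unfold pf
        simp only [Nat.add_sub_cancel]
        apply Nat.le_findGreatest (by omega)
        rw [hsnoc, cand_iff (by omega) (by omega)]
        simpa using ⟨hFs, hC⟩
      · have hple : pf rel (n+1) ≤ n := by
          have := pf_lt (n := n+1) (by omega) (rel := rel)
          omega
        have hpsfx := pf_suffix rel (n+1)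
        rcases Nat.eq_zero_or_pos (pf rel (n+1)) with hp0 | hp0
        · omega
        · rw [hsnoc, cand_iff hp0 (by omega)] at hpsfx
          have h1 : pf rel (n+1) - 1 ≤ pf rel n := pf_max (by omega) hpsfx.1
          have h2 : rel.take (pf rel (n+1) - 1) <:+ rel.take (pf rel n) :=
            (chain_iff h1 (by omega) (pf_suffix rel n)).mp hpsfx.1
          have h3 : pf rel (n+1) - 1 ≤ F := hRmax _ h1 ⟨h2, Or.inr ⟨by omega, hpsfx.2⟩⟩
          omega
    · rw [if_neg hC]
      have hF0 : F = 0 := by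
        rcases hRF.2 with h | h
        · exact h
        · exact absurd h.2 hC
      rw [hF0]
      symm
      unfold pf
      simp only [Nat.add_sub_cancel]
      rw [Nat.findGreatest_eq_zero_iff]
      intro j h0j hjn hsfx
      rw [hsnoc, cand_iff h0j (by omega)] at hsfx
      have h1 : j - 1 ≤ pf rel n := pf_max (by omega) hsfx.1
      have h2 : rel.take (j-1) <:+ rel.take (pf rel n) :=
        (chain_iff h1 (by omega) (pf_suffix rel n)).mp hsfx.1
      have h3 : j - 1 ≤ F := hRmax _ h1 ⟨h2, Or.inr ⟨by omega, hsfx.2⟩⟩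
      have hj1 : j = 1 := by omega
      apply hC
      rw [hF0]
      have := hsfx.2
      rwa [show j - 1 = 0 by omega] at this
  simp only [key]

theorem build_correct {rel : List String} (hrel : rel ≠ []) :
    ∀ i, i ≤ rel.length - 1 →
      ((rel.drop 1).take i).foldl (kmpBStep rel) ([0], 0) =
        ((List.range (i+1)).map (fun j => pf rel (j+1)), pf rel (i+1)) := by
  have hm : 0 < rel.length := List.length_pos_of_ne_nil hrel
  intro i
  induction i with
  | zero =>
    intro _
    simp [pf, List.range_one]
  | succ i ih =>
    intro hi
    have hstep : (rel.drop 1).take (i+1) = (rel.drop 1).take i ++ [(rel.drop 1).getD i ""] :=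
      take_getD (by simp; omega)
    have hgd : (rel.drop 1).getD i "" = rel.getD (i+1) "" := by
      simp [List.getD_eq_getElem?_getD, List.getElem?_drop, Nat.add_comm]
    rw [hstep, List.foldl_append, ih (by omega)]
    simp only [List.foldl_cons, List.foldl_nil, hgd]
    rw [bstep_correct (n := i+1) (by omega) (by omega) ?htbl]
    case htbl =>
      intro j hj
      simp [List.getD_eq_getElem?_getD, List.getElem?_map, List.getElem?_range hj]
    simp [List.range_succ]

theorem kmpBuild_tbl {rel : List String} (hrel : rel ≠ []) :
    ∀ i, i < rel.length → (kmpBuild rel).1.getD i 0 = pf rel (i+1) := by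
  have hm : 0 < rel.length := List.length_pos_of_ne_nil hrel
  have hfull : (rel.drop 1).take (rel.length - 1) = rel.drop 1 := by
    have : (rel.drop 1).length = rel.length - 1 := by simp
    rw [← this]
    exact List.take_length
  have h := build_correct hrel (rel.length - 1) le_rfl
  rw [hfull] at h
  unfold kmpBuild
  rw [h]
  intro i hi
  simp only
  rw [show rel.length - 1 + 1 = rel.length by omega]
  simp [List.getD_eq_getElem?_getD, List.getElem?_map, List.getElem?_range hi]

theorem A_go_correct (root rel : List String) :
    ∀ ov, ov ≤ min root.length rel.length →
      pyA_go root rel ov = root ++ rel.drop (Nat.findGreatest (Bp rel root) ov) := by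
  intro ov
  induction ov with
  | zero => intro _; simp [pyA_go]
  | succ ov ih =>
    intro hov
    have hn : ov + 1 ≤ root.length := by omega
    have hm : ov + 1 ≤ rel.length := by omega
    rw [pyA_go]
    rw [PySem.List.slice_from_neg_natCast root (k := ov+1) (by omega),
      PySem.List.slice_to_natCast, PySem.List.slice_from_natCast]
    by_cases heq : root.drop (root.length - (ov+1)) = rel.take (ov+1)
    · rw [if_pos heq]
      have hBp : Bp rel root (ov+1) := ⟨hm, by rw [← heq]; exact List.drop_suffix _ _⟩
      rw [Nat.findGreatest_succ, if_pos hBp]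
    · rw [if_neg heq, ih (by omega), Nat.findGreatest_succ, if_neg ?hnb]
      case hnb =>
        rintro ⟨h1, hsfx⟩
        apply heq
        have := List.suffix_iff_eq_drop.mp hsfx
        rw [List.length_take] at this
        rw [show min (ov+1) rel.length = ov + 1 by omega] at this
        exact this.symm

-- ===== VERDICT (by name: the statement is the Claim_ definition above) =====
theorem deduplicate_path_components_py_spec : Claim_equal_deduplicate_path_components_py := by
  intro root rel _
  unfold Spec_deduplicate_path_components_py deduplicate_path_components_py
    deduplicate_path_components_py_alt
  by_cases hrel : rel = []
  · simp [hrel]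
  · rw [if_neg hrel, if_neg hrel]
    simp only
    have htbl := kmpBuild_tbl hrel
    have hscan : root.foldl (kmpSStep rel (kmpBuild rel).1 rel.length) 0 = Sfun rel root := by
      rw [show (0 : Nat) = Sfun rel [] from (Sfun_nil rel).symm]
      rw [scan_inv htbl root []]
      simp
    rw [hscan, A_go_correct root rel _ le_rfl]
    have hfg : Nat.findGreatest (Bp rel root) (min root.length rel.length) = Sfun rel root := by
      unfold Sfun
      symm
      apply fg_shrink (Nat.min_le_right _ _)
      intro j h1 h2 hB
      obtain ⟨hjm, hsfx⟩ := hB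
      have hlen := hsfx.length_le
      rw [List.length_take] at hlen
      omega
    rw [hfg]
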